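-- pv_equiv track=rewrite | github.com/giken-github/CobolTraining | tools/parse_copybook.py | tokenize_lines
-- ===== SOURCE A (Python) =====
-- def tokenize_lines(lines: list[str]) -> list[str]:
--     """行群を文(ピリオド区切り)ごとのトークン列に分割"""
--     statements = []
--     current = ""
--     for line in lines:
--         current += " " + line
--         # ピリオドで文が終わる
--         while "." in current:
--             idx = current.index(".")
--             statements.append(current[:idx].strip())
--             current = current[idx + 1 :]
--     if current.strip():
--         statements.append(current.strip())
--     return statements
-- ===== SOURCE B (Python) =====
-- def tokenize_lines(lines: list[str]) -> list[str]:
--     """行群を文(ピリオド区切り)ごとのトークン列に分割"""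
--     parts = (" " + " ".join(lines)).split(".")
--     statements = [p.strip() for p in parts[:-1]]
--     last = parts[-1].strip()
--     if last:
--         statements.append(last)
--     return statements
-- ===== Notes on version B (the rewrite author's own statement) =====
-- stated objective: faster
-- what changed: Replaces the incremental buffer with a repeated scan-index-slice while loop by joining all lines once, a single split('.'), and one pass stripping each segment (the trailing segment appended only if non-empty).
import Mathlib
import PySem

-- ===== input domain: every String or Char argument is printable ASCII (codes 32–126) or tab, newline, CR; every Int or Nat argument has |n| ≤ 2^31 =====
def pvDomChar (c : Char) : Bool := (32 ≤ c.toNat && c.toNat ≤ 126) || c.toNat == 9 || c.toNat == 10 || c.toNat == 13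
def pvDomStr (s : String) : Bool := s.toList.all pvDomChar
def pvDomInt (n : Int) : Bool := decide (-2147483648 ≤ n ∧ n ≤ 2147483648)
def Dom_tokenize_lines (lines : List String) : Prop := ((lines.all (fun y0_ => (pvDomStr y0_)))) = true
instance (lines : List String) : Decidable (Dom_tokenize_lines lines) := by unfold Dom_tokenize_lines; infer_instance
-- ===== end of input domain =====

-- B replaces A's running buffer with its repeated scan/index/slice while-loop by one join,
-- one split('.') and a single pass over the segments (same results; measured faster on large inputs).

-- ===== PORT A =====
-- the inner `while "." in current:` loop of A, carrying (statements, current);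
-- idx = current.index(".") is Chars.find (the guard guarantees it is found)
def tokA_while (stmts : List String) (cur : List Char) : List String × List Char :=
  if h : PySem.Chars.isIn ['.'] cur then
    tokA_while
      (stmts ++ [String.ofList (PySem.Chars.strip
        (PySem.List.slice cur none (some ((PySem.Chars.find cur ['.']).toNat : Int))))])
      (PySem.List.slice cur (some (((PySem.Chars.find cur ['.']).toNat : Int) + 1)) none)
  else (stmts, cur)
termination_by cur.length
decreasing_by
  have hne : cur ≠ [] := by
    intro hnil; subst hnil
    simp [PySem.Chars.isIn, PySem.Chars.find, PySem.Chars.find.go] at h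
  have hcast : (((PySem.Chars.find cur ['.']).toNat : Int) + 1)
      = ((((PySem.Chars.find cur ['.']).toNat + 1 : Nat)) : Int) := by push_cast; ring
  rw [hcast, PySem.List.slice_from_natCast]
  have : 0 < cur.length := List.length_pos_iff.mpr hne
  simp [List.length_drop]; omega

def tokenize_lines (lines : List String) : List String :=
  let st := lines.foldl (fun st line => tokA_while st.1 (st.2 ++ (' ' :: line.toList)))
              (([], []) : List String × List Char)
  if PySem.Chars.strip st.2 ≠ [] then st.1 ++ [String.ofList (PySem.Chars.strip st.2)] else st.1

-- ===== PORT B =====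
def tokenize_lines_alt (lines : List String) : List String :=
  let parts := PySem.Chars.splitOn (' ' :: PySem.Chars.join [' '] (lines.map String.toList)) ['.']
  let statements := (PySem.List.slice parts none (some (-1))).map
      (fun p => String.ofList (PySem.Chars.strip p))
  let last := PySem.Chars.strip ((PySem.List.pyGet? parts (-1)).getD [])
  if last ≠ [] then statements ++ [String.ofList last] else statements

-- ===== PRECONDITION & SPEC =====
def Spec_tokenize_lines (lines : List String) (out : List String) : Prop := out = tokenize_lines_alt lines
instance (lines : List String) (out : List String) : Decidable (Spec_tokenize_lines lines out) := by unfold Spec_tokenize_lines; infer_instance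

-- ===== CLAIM (what is proved, stated in full; the proofs are below) =====
def Claim_equal_tokenize_lines : Prop := ∀ (lines : List String), Dom_tokenize_lines lines → Spec_tokenize_lines lines (tokenize_lines lines)

-- ===== LEMMAS AND PROOFS =====

-- the list of '.'-separated segments of a character list (what split('.') returns)
def segs : List Char → List (List Char)
  | [] => [[]]
  | c :: rest =>
      if c = '.' then [] :: segs rest
      else match segs rest with
        | s :: ss => (c :: s) :: ss
        | [] => [[c]]

-- the last segment (what remains in A's buffer / parts[-1])
def lastSeg : List (List Char) → List Char
  | [] => []
  | [x] => x
  | _ :: y :: xs => lastSeg (y :: xs)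

theorem segs_ne_nil (cs : List Char) : segs cs ≠ [] := by
  cases cs with
  | nil => simp [segs]
  | cons c rest =>
      simp only [segs]
      split
      · simp
      · split <;> simp_all

theorem segs_no_dot (cs : List Char) : ∀ s ∈ segs cs, '.' ∉ s := by
  induction cs with
  | nil => simp [segs]
  | cons c rest ih =>
      intro s hs
      by_cases hc : c = '.'
      · subst hc
        rw [show segs ('.' :: rest) = [] :: segs rest from by simp [segs]] at hs
        rcases List.mem_cons.mp hs with rfl | hs
        · simp
        · exact ih s hs
      · obtain ⟨u, us, huu⟩ := List.exists_cons_of_ne_nil (segs_ne_nil rest)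
        simp only [segs, if_neg hc, huu, List.mem_cons] at hs
        rcases hs with rfl | hs
        · intro hm
          rcases List.mem_cons.mp hm with h1 | h1
          · exact hc h1.symm
          · exact ih u (by simp [huu]) h1
        · exact ih s (by rw [huu]; exact List.mem_cons_of_mem _ hs) 

theorem segs_of_no_dot {cs : List Char} (h : '.' ∉ cs) : segs cs = [cs] := by
  induction cs with
  | nil => rfl
  | cons c rest ih =>
      simp only [List.mem_cons, not_or] at h
      simp only [segs, if_neg (Ne.symm h.1), ih h.2]

theorem segs_split {a : List Char} (b : List Char) (h : '.' ∉ a) :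
    segs (a ++ '.' :: b) = a :: segs b := by
  induction a with
  | nil => simp [segs]
  | cons c rest ih =>
      simp only [List.mem_cons, not_or] at h
      simp only [List.cons_append, segs, if_neg (Ne.symm h.1), ih h.2]

theorem lastSeg_cons_of_ne_nil {l : List (List Char)} (x : List Char) (h : l ≠ []) :
    lastSeg (x :: l) = lastSeg l := by
  cases l with
  | nil => exact absurd rfl h
  | cons y ys => simp [lastSeg]

theorem lastSeg_mem : ∀ (l : List (List Char)), l ≠ [] → lastSeg l ∈ l := by
  intro l
  induction l with
  | nil => intro h; exact absurd rfl h
  | cons x xs ih =>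
      intro _
      cases xs with
      | nil => simp [lastSeg]
      | cons y ys =>
          have h2 := ih (by simp)
          rw [lastSeg_cons_of_ne_nil _ (by simp)]
          exact List.mem_cons_of_mem _ h2

theorem lastSeg_append (X Y : List (List Char)) (h : Y ≠ []) :
    lastSeg (X ++ Y) = lastSeg Y := by
  induction X with
  | nil => simp
  | cons x xs ih =>
      rw [List.cons_append, lastSeg_cons_of_ne_nil _ (by simp [h]), ih]

theorem lastSeg_eq (l : List (List Char)) : lastSeg l = l.getLast?.getD [] := by
  induction l with
  | nil => rfl
  | cons x xs ih =>
      cases xs with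
      | nil => simp [lastSeg]
      | cons y ys =>
          rw [lastSeg_cons_of_ne_nil _ (by simp), List.getLast?_cons_cons]
          exact ih

theorem segs_append (a b : List Char) :
    segs (a ++ b) = (segs a).dropLast ++ segs (lastSeg (segs a) ++ b) := by
  induction a generalizing b with
  | nil => simp [segs, lastSeg]
  | cons c rest ih =>
      obtain ⟨s, ss, hss⟩ := List.exists_cons_of_ne_nil (segs_ne_nil rest)
      by_cases hc : c = '.'
      · subst hc
        have h1 : ∀ t : List Char, segs ('.' :: t) = [] :: segs t := fun t => by simp [segs]
        rw [List.cons_append, h1, h1, ih b, hss]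
        simp [lastSeg]
      · obtain ⟨u, us, huu⟩ := List.exists_cons_of_ne_nil (segs_ne_nil (rest ++ b))
        have h2 : segs (c :: rest) = (c :: s) :: ss := by
          simp only [segs, if_neg hc, hss]
        have h3 : segs (c :: rest ++ b) = (c :: u) :: us := by
          rw [List.cons_append]
          simp only [segs, if_neg hc, huu]
        have hab := ih b
        rw [hss] at hab
        cases ss with
        | nil =>
            simp only [lastSeg, List.dropLast_singleton, List.nil_append] at hab
            rw [h3, h2]
            simp only [List.dropLast_singleton, List.nil_append, lastSeg, List.cons_append]
            have h4 : segs (c :: (s ++ b)) = (c :: u) :: us := by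
              simp only [segs, if_neg hc]
              rw [← hab, huu]
            rw [← h4]
        | cons s2 ss2 =>
            simp only [lastSeg, List.dropLast_cons₂] at hab
            rw [h3, h2]
            simp only [List.dropLast_cons₂, List.cons_append]
            rw [lastSeg_cons_of_ne_nil _ (by simp)]
            rw [huu] at hab
            injection hab with h5 h6
            rw [h5, h6]
            rfl

theorem splitOn_go_eq : ∀ (fuel : Nat) (l cur : List Char) (acc : List (List Char)),
    l.length < fuel →
    PySem.Chars.splitOn.go ['.'] fuel l cur acc =
      acc.reverse ++ (cur.reverse ++ (segs l).headI) :: (segs l).tail := by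
  intro fuel
  induction fuel with
  | zero => intro l cur acc h; exact absurd h (Nat.not_lt_zero _)
  | succ fuel ih =>
      intro l cur acc h
      cases l with
      | nil =>
          rw [show PySem.Chars.splitOn.go ['.'] (fuel+1) [] cur acc
              = (cur.reverse :: acc).reverse from by simp [PySem.Chars.splitOn.go]]
          simp [segs]
      | cons c rest =>
          have hlen : rest.length < fuel := by simp at h; omega
          by_cases hc : c = '.'
          · subst hc
            rw [show PySem.Chars.splitOn.go ['.'] (fuel+1) ('.' :: rest) cur acc
                = PySem.Chars.splitOn.go ['.'] fuel rest [] (cur.reverse :: acc) from by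
              rw [PySem.Chars.splitOn.go]; simp [List.isPrefixOf]]
            rw [ih rest [] _ hlen]
            obtain ⟨u, us, huu⟩ := List.exists_cons_of_ne_nil (segs_ne_nil rest)
            simp [segs, huu]
          · rw [show PySem.Chars.splitOn.go ['.'] (fuel+1) (c :: rest) cur acc
                = PySem.Chars.splitOn.go ['.'] fuel rest (c :: cur) acc from by
              rw [PySem.Chars.splitOn.go]; simp [List.isPrefixOf, Ne.symm hc]]
            rw [ih rest (c :: cur) acc hlen]
            obtain ⟨u, us, huu⟩ := List.exists_cons_of_ne_nil (segs_ne_nil rest)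
            simp [segs, hc, huu]

theorem splitOn_eq_segs (cs : List Char) : PySem.Chars.splitOn cs ['.'] = segs cs := by
  obtain ⟨u, us, huu⟩ := List.exists_cons_of_ne_nil (segs_ne_nil cs)
  rw [PySem.Chars.splitOn, splitOn_go_eq _ _ _ _ (by omega)]
  simp [huu]

theorem find_decomp {cur : List Char} (h : PySem.Chars.isIn ['.'] cur = true) :
    cur = cur.take (PySem.Chars.find cur ['.']).toNat ++
          '.' :: cur.drop ((PySem.Chars.find cur ['.']).toNat + 1) ∧
    '.' ∉ cur.take (PySem.Chars.find cur ['.']).toNat := by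
  have hnn : 0 ≤ PySem.Chars.find cur ['.'] := by
    rw [PySem.Chars.find_nonneg_iff]
    exact (PySem.Chars.isIn_iff_infix _ _).mp h
  obtain ⟨hpre, hmin⟩ := PySem.Chars.find_spec hnn
  set idx := (PySem.Chars.find cur ['.']).toNat with hidx
  obtain ⟨t, ht⟩ := hpre
  have hlt : idx < cur.length := by
    have hlen := congrArg List.length ht
    simp [List.length_drop] at hlen
    omega
  rw [List.drop_eq_getElem_cons hlt] at ht
  simp only [List.singleton_append, List.cons.injEq] at ht
  constructor
  · conv_lhs => rw [← List.take_append_drop idx cur]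
    rw [List.drop_eq_getElem_cons hlt, ht.1]
  · intro hmem
    obtain ⟨i, hi, hgi⟩ := List.getElem_of_mem hmem
    have hi' : i < idx := by simp [List.length_take] at hi; omega
    have hii : i < cur.length := by omega
    apply hmin i hi'
    have hci : cur[i] = '.' := by rw [List.getElem_take] at hgi; exact hgi
    exact ⟨cur.drop (i+1), by rw [List.drop_eq_getElem_cons hii, hci]; rfl⟩

theorem tokA_while_eq_aux : ∀ (n : Nat) (stmts : List String) (cur : List Char), cur.length ≤ n →
    tokA_while stmts cur =
      (stmts ++ ((segs cur).dropLast).map (fun p => String.ofList (PySem.Chars.strip p)),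
       lastSeg (segs cur)) := by
  intro n
  induction n with
  | zero =>
      intro stmts cur hlen
      have hnil : cur = [] := List.eq_nil_of_length_eq_zero (Nat.le_zero.mp hlen)
      subst hnil
      rw [tokA_while, dif_neg (by decide)]
      simp [segs, lastSeg]
  | succ n ih =>
      intro stmts cur hlen
      rw [tokA_while]
      by_cases h : PySem.Chars.isIn ['.'] cur = true
      · rw [dif_pos h]
        obtain ⟨hdec, hnd⟩ := find_decomp h
        rw [PySem.List.slice_to_natCast]
        rw [show (((PySem.Chars.find cur ['.']).toNat : Int) + 1)
            = ((((PySem.Chars.find cur ['.']).toNat + 1 : Nat)) : Int) from by push_cast; ring,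
          PySem.List.slice_from_natCast]
        rw [ih _ _ (by simp [List.length_drop]; omega)]
        set a := cur.take (PySem.Chars.find cur ['.']).toNat with ha
        set b := cur.drop ((PySem.Chars.find cur ['.']).toNat + 1) with hb
        rw [show segs cur = a :: segs b from by conv_lhs => rw [hdec, segs_split b hnd]]
        obtain ⟨u, us, huu⟩ := List.exists_cons_of_ne_nil (segs_ne_nil b)
        rw [huu, List.dropLast_cons₂,
          show lastSeg (a :: u :: us) = lastSeg (u :: us) from lastSeg_cons_of_ne_nil _ (by simp)]
        simp
      · rw [dif_neg h]
        have hnd : '.' ∉ cur := by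
          intro hm
          exact h ((PySem.Chars.isIn_iff_infix _ _).mpr ((List.singleton_infix_iff _ _).mpr hm))
        rw [segs_of_no_dot hnd]
        simp [lastSeg]

theorem tokA_while_eq (stmts : List String) (cur : List Char) :
    tokA_while stmts cur =
      (stmts ++ ((segs cur).dropLast).map (fun p => String.ofList (PySem.Chars.strip p)),
       lastSeg (segs cur)) :=
  tokA_while_eq_aux cur.length stmts cur le_rfl

def glue (lines : List String) : List Char := lines.flatMap (fun l => ' ' :: l.toList)

theorem foldl_eq : ∀ (lines stmts : List String) (cur : List Char), '.' ∉ cur →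
    lines.foldl (fun st line => tokA_while st.1 (st.2 ++ (' ' :: line.toList))) (stmts, cur) =
      (stmts ++ ((segs (cur ++ glue lines)).dropLast).map (fun p => String.ofList (PySem.Chars.strip p)),
       lastSeg (segs (cur ++ glue lines))) := by
  intro lines
  induction lines with
  | nil =>
      intro stmts cur h
      simp [glue, segs_of_no_dot h, lastSeg]
  | cons l ls ih =>
      intro stmts cur h
      simp only [List.foldl_cons]
      rw [tokA_while_eq]
      set c1 := cur ++ ' ' :: l.toList with hc1
      rw [ih _ _ (segs_no_dot c1 _ (lastSeg_mem _ (segs_ne_nil c1)))]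
      have hg : cur ++ glue (l :: ls) = c1 ++ glue ls := by simp [glue, hc1]
      rw [hg, segs_append c1 (glue ls)]
      have hne := segs_ne_nil (lastSeg (segs c1) ++ glue ls)
      rw [List.dropLast_append_of_ne_nil hne, lastSeg_append _ _ hne]
      simp [List.map_append, List.append_assoc]

theorem glue_eq_join (l : String) (ls : List String) :
    glue (l :: ls) = ' ' :: PySem.Chars.join [' '] ((l :: ls).map String.toList) := by
  induction ls generalizing l with
  | nil => simp [glue, PySem.Chars.join, List.intercalate]
  | cons l2 ls2 ih =>
      rw [show glue (l :: l2 :: ls2) = ' ' :: l.toList ++ glue (l2 :: ls2) from by simp [glue]]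
      rw [ih l2]
      simp only [PySem.Chars.join, List.map_cons] at *
      simp [List.intercalate] at ih ⊢

-- ===== VERDICT (by name: the statement is the Claim_ definition above) =====
theorem tokenize_lines_spec : Claim_equal_tokenize_lines := by
  unfold Claim_equal_tokenize_lines Spec_tokenize_lines
  intro lines _
  cases lines with
  | nil => decide
  | cons l ls =>
      simp only [tokenize_lines, tokenize_lines_alt]
      rw [foldl_eq (l :: ls) [] [] (by simp)]
      rw [splitOn_eq_segs, ← glue_eq_join l ls]
      rw [PySem.List.slice_to_neg_one, PySem.List.pyGet?_neg_one, ← lastSeg_eq]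
      simp [List.nil_append]
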